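-- pv_equiv track=rewrite | github.com/TheeoCornnaro/code_exercises | src/code_exercises/algorithms/scrabble.py | scrabble_score
-- ===== SOURCE A (Python) =====
-- def scrabble_score(word, letters):
--     values = {"a": 1, "c": 3, "b": 3, "e": 1, "d": 2, "g": 2, "f": 4, "i": 1, "h": 4,
--               "k": 5, "j": 8, "m": 3, "l": 1, "o": 1, "n": 1, "q": 10, "p": 3, "s": 1,
--               "r": 1, "u": 1, "t": 1, "w": 4, "v": 4, "y": 4, "x": 8, "z": 10}
--
--     FilteredValues = {k: v for (k, v) in values.items() if k in letters}
--     result = 0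
--     used = []
--     for letter in word:
--         if letter not in used:
--             try:
--                 result += FilteredValues[letter]
--             except KeyError:
--                 result -= 1000
--         else:
--             result -= 1000
--         used.append(letter)
--     return result
-- ===== SOURCE B (Python) =====
-- def scrabble_score(word, letters):
--     values = {"a": 1, "c": 3, "b": 3, "e": 1, "d": 2, "g": 2, "f": 4, "i": 1, "h": 4,
--               "k": 5, "j": 8, "m": 3, "l": 1, "o": 1, "n": 1, "q": 10, "p": 3, "s": 1,
--               "r": 1, "u": 1, "t": 1, "w": 4, "v": 4, "y": 4, "x": 8, "z": 10}
--
--     FilteredValues = {k: v for (k, v) in values.items() if k in letters}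
--
--     counts = {}
--     for ch in word:
--         counts[ch] = counts.get(ch, 0) + 1
--     result = 0
--     for ch, c in counts.items():
--         result += FilteredValues.get(ch, -1000) - 1000 * (c - 1)
--     return result
-- ===== Notes on version B (the rewrite author's own statement) =====
-- stated objective: faster
-- what changed: Replaced the per-character scan with a 'used' list (linear membership test per character) by building a frequency dict in one pass and summing per distinct letter: first occurrence contributes FilteredValues.get(ch,-1000), each repeat contributes -1000.
import Mathlib
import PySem

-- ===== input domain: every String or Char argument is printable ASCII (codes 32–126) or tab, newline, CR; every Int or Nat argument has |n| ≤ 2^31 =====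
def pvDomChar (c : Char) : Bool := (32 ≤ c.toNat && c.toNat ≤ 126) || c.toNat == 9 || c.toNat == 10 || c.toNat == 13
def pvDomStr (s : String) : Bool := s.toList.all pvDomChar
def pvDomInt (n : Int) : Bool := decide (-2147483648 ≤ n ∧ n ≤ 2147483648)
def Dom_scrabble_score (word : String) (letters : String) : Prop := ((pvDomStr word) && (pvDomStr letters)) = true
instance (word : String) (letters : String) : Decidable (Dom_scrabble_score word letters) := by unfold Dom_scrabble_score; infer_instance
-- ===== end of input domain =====

-- B replaces A's quadratic 'used'-list scan by a frequency dict and a sum over distinct letters (objective: faster).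

-- ===== PORT A =====
-- the 'values' dict literal (keys are 1-char strings in Python, iterated as chars; ported as Char keys)
def pvValues : PySem.Dict Char Int :=
  PySem.Dict.ofList [('a',1),('c',3),('b',3),('e',1),('d',2),('g',2),('f',4),('i',1),('h',4),
    ('k',5),('j',8),('m',3),('l',1),('o',1),('n',1),('q',10),('p',3),('s',1),
    ('r',1),('u',1),('t',1),('w',4),('v',4),('y',4),('x',8),('z',10)]

-- 'k in letters' for a 1-char key k is exactly char membership in letters
def scrabble_score (word : String) (letters : String) : Int :=
  let fv : PySem.Dict Char Int :=
    PySem.Dict.ofList (pvValues.items.filter (fun kv => letters.toList.contains kv.1))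
  (word.toList.foldl (fun (st : Int × List Char) letter =>
    let r : Int :=
      if !st.2.contains letter then
        -- try: result += FilteredValues[letter]  except KeyError: result -= 1000
        match fv.get? letter with
        | some v => st.1 + v
        | none => st.1 - 1000
      else st.1 - 1000
    (r, st.2 ++ [letter])) ((0 : Int), ([] : List Char))).1

-- ===== PORT B =====
def scrabble_score_alt (word : String) (letters : String) : Int :=
  let fv : PySem.Dict Char Int :=
    PySem.Dict.ofList (pvValues.items.filter (fun kv => letters.toList.contains kv.1))
  let counts : PySem.Dict Char Int :=
    word.toList.foldl (fun d ch => d.insert ch (d.getD ch 0 + 1)) PySem.Dict.empty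
  counts.items.foldl (fun (acc : Int) p => acc + (fv.getD p.1 (-1000) - 1000 * (p.2 - 1))) 0

-- ===== PRECONDITION & SPEC =====
def Spec_scrabble_score (word : String) (letters : String) (out : Int) : Prop := out = scrabble_score_alt word letters
instance (word : String) (letters : String) (out : Int) : Decidable (Spec_scrabble_score word letters out) := by unfold Spec_scrabble_score; infer_instance

-- ===== CLAIM (what is proved, stated in full; the proofs are below) =====
def Claim_equal_scrabble_score : Prop := ∀ (word : String) (letters : String), Dom_scrabble_score word letters → Spec_scrabble_score word letters (scrabble_score word letters)

-- ===== LEMMAS AND PROOFS =====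

-- the reference value: sum over distinct letters of word
def pvSsum (fv : PySem.Dict Char Int) (w : List Char) : Int :=
  ((PySem.Set.ofList w).map (fun k => fv.getD k (-1000) - 1000 * ((w.count k : Int) - 1))).sum

def pvStepA (fv : PySem.Dict Char Int) (st : Int × List Char) (letter : Char) : Int × List Char :=
  let r : Int :=
    if !st.2.contains letter then
      match fv.get? letter with
      | some v => st.1 + v
      | none => st.1 - 1000
    else st.1 - 1000
  (r, st.2 ++ [letter])

theorem pvUsed_eq (fv : PySem.Dict Char Int) : ∀ (w : List Char) (r : Int) (us : List Char),
    (w.foldl (pvStepA fv) (r, us)).2 = us ++ w := by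
  intro w
  induction w with
  | nil => intro r us; simp
  | cons c w ih => intro r us; simp [pvStepA, ih]

theorem pvIteSum : ∀ (l : List Char) (c : Char) (x : Int), l.Nodup →
    (l.map (fun k => if k = c then x else 0)).sum = if c ∈ l then x else 0 := by
  intro l c x
  induction l with
  | nil => simp
  | cons a l ih =>
    intro h
    rcases List.nodup_cons.mp h with ⟨ha, hl⟩
    rw [List.map_cons, List.sum_cons, ih hl]
    by_cases hac : a = c
    · subst hac
      simp [ha]
    · simp [hac, Ne.symm hac]

theorem pvSsum_snoc (fv : PySem.Dict Char Int) (w : List Char) (c : Char) :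
    pvSsum fv (w ++ [c]) = pvSsum fv w + (if c ∈ w then -1000 else fv.getD c (-1000)) := by
  unfold pvSsum
  rw [PySem.Set.ofList_append_singleton]
  by_cases hc : c ∈ w
  · rw [PySem.Set.add_of_mem (by simpa [PySem.Set.mem_ofList] using hc)]
    have hnd := PySem.Set.nodup_ofList (xs := w)
    have hmem : c ∈ PySem.Set.ofList w := by simpa [PySem.Set.mem_ofList] using hc
    have hcount : ∀ k : Char, ((w ++ [c]).count k : Int) = (w.count k : Int) + (if k = c then 1 else 0) := by
      intro k
      rcases eq_or_ne k c with h | h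
      · subst h; push_cast [List.count_append]; simp
      · push_cast [List.count_append]
        simp [h, Ne.symm h]
    have hmaps : ((PySem.Set.ofList w).map (fun k => fv.getD k (-1000) - 1000 * (((w ++ [c]).count k : Int) - 1))).sum
        = ((PySem.Set.ofList w).map (fun k => (fv.getD k (-1000) - 1000 * ((w.count k : Int) - 1)) + (if k = c then -1000 else 0))).sum := by
      congr 1
      apply List.map_congr_left
      intro k _
      rw [hcount k]
      rcases eq_or_ne k c with hk | hk
      · simp [hk]; ring
      · simp [hk]
    rw [hmaps, List.sum_map_add, pvIteSum _ c (-1000) hnd, if_pos hmem, if_pos hc]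
  · rw [PySem.Set.add_of_not_mem (by simpa [PySem.Set.mem_ofList] using hc)]
    rw [List.map_append, List.sum_append]
    have h1 : ((PySem.Set.ofList w).map (fun k => fv.getD k (-1000) - 1000 * (((w ++ [c]).count k : Int) - 1))).sum
        = ((PySem.Set.ofList w).map (fun k => fv.getD k (-1000) - 1000 * ((w.count k : Int) - 1))).sum := by
      congr 1
      apply List.map_congr_left
      intro k hk
      have hkc : k ≠ c := by
        intro h; subst h
        exact hc (by simpa [PySem.Set.mem_ofList] using hk)
      simp [List.count_append, Ne.symm hkc]
    have h2 : ((w ++ [c]).count c : Int) = 1 := by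
      rw [List.count_append]
      simp [List.count_eq_zero_of_not_mem hc]
    rw [h1, if_neg hc, List.map_singleton, List.sum_singleton, h2]
    ring

theorem pvFoldA_eq_Ssum (fv : PySem.Dict Char Int) (w : List Char) :
    (w.foldl (pvStepA fv) ((0 : Int), ([] : List Char))).1 = pvSsum fv w := by
  induction w using List.reverseRecOn with
  | nil => simp [pvSsum]
  | append_singleton l a ih =>
    rw [List.foldl_append, pvSsum_snoc, ← ih]
    have hused := pvUsed_eq fv l (0 : Int) []
    simp only [List.foldl_cons, List.foldl_nil]
    rcases hstate : l.foldl (pvStepA fv) ((0 : Int), ([] : List Char)) with ⟨r, us⟩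
    have hus : us = l := by
      rw [hstate] at hused; simpa using hused
    subst hus
    unfold pvStepA
    by_cases hc : a ∈ us
    · simp [hc]; omega
    · simp only [List.contains_eq_mem, hc, decide_false, Bool.not_false, if_true]
      rcases hfv : fv.get? a with _ | v
      · simp [PySem.Dict.getD_eq_get?_getD, hfv]; omega
      · simp [PySem.Dict.getD_eq_get?_getD, hfv]

theorem pvMain (fv : PySem.Dict Char Int) (w : List Char) :
    (w.foldl (fun (st : Int × List Char) letter =>
      let r : Int :=
        if !st.2.contains letter then
          match fv.get? letter with
          | some v => st.1 + v
          | none => st.1 - 1000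
        else st.1 - 1000
      (r, st.2 ++ [letter])) ((0 : Int), ([] : List Char))).1
    = (w.foldl (fun d ch => d.insert ch (d.getD ch 0 + 1)) PySem.Dict.empty).items.foldl
        (fun (acc : Int) p => acc + (fv.getD p.1 (-1000) - 1000 * (p.2 - 1))) 0 := by
  rw [show (fun (st : Int × List Char) letter =>
      let r : Int :=
        if !st.2.contains letter then
          match fv.get? letter with
          | some v => st.1 + v
          | none => st.1 - 1000
        else st.1 - 1000
      (r, st.2 ++ [letter])) = pvStepA fv from rfl]
  rw [PySem.Dict.foldl_insert_getD_add_one_eq_counter, PySem.List.foldl_add,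
    PySem.Dict.items_counter, pvFoldA_eq_Ssum]
  unfold pvSsum
  simp [List.map_map, Function.comp_def]

-- ===== VERDICT (by name: the statement is the Claim_ definition above) =====
theorem scrabble_score_spec : Claim_equal_scrabble_score := by
  intro word letters _
  unfold Spec_scrabble_score scrabble_score scrabble_score_alt
  exact pvMain _ word.toList
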